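-- pv_equiv track=rewrite | github.com/ottobonilla95/elevaite-test | elevaite_backend/hippo_qdrant/generate_response_v3.py | group_by_subject
-- ===== SOURCE A (Python) =====
-- from typing import Dict, Any, List
--
-- def group_by_subject(passages: List[Dict[str, Any]]) -> Dict[str, List[str]]:
--     """Group passages by subject with deduplication"""
--     grouped = {}
--     for p in passages:
--         subj = p.get("subject", "Unknown")
--         pred = p.get("predicate", "")
--         obj = p.get("object", "")
--         if subj not in grouped:
--             grouped[subj] = []
--         fact_line = f"{pred}: {obj}".strip()
--         if fact_line and fact_line not in grouped[subj]:
--             grouped[subj].append(fact_line)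
--     return grouped
-- ===== SOURCE B (Python) =====
-- def group_by_subject(passages):
--     """Group passages by subject with deduplication (subjects first, then per-subject scans)."""
--     def subj(p):
--         return p.get("subject", "Unknown")
--
--     def fact(p):
--         return f"{p.get('predicate', '')}: {p.get('object', '')}".strip()
--
--     subjects = list(dict.fromkeys(map(subj, passages)))
--     return {
--         s: list(dict.fromkeys(
--             f for f in (fact(p) for p in passages if subj(p) == s) if f
--         ))
--         for s in subjects
--     }
-- ===== Notes on version B (the rewrite author's own statement) =====
-- stated objective: alternative
-- what changed: B replaces A's single dict-building fold (create-entry, membership-test, append per passage) by a staged closed form: first the ordered distinct subject list, then for each subject an independent scan of the passages collecting its non-empty fact lines, dedup'ed once with dict.fromkeys.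
import Mathlib
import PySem

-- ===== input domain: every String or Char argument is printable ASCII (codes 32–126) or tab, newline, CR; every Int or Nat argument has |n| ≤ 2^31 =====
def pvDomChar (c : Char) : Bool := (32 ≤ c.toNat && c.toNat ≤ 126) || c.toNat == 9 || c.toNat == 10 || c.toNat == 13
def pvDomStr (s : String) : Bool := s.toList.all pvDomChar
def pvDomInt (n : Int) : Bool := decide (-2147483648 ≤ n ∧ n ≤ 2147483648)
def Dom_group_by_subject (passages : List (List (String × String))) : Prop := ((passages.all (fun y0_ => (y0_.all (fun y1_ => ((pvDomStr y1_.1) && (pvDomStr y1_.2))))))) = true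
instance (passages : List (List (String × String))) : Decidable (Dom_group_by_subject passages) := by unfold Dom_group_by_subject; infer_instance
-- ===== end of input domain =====

-- B groups by staged passes: the ordered distinct subject list first, then one
-- independent scan of the passages per subject, dedup'ed once at the end;
-- A interleaves grouping and dedup in a single dict-building loop. Objective:
-- alternative decomposition (no dict, per-subject scans); not claimed faster.

-- shared helper: p.get(key, default) on an association list (first match)
def pvGet : List (String × String) → String → String → String
  | [], _, dflt => dflt
  | (k, v) :: rest, key, dflt => if k == key then v else pvGet rest key dflt

-- ===== PORT A =====
-- loop body of A: ensure the subject entry exists, then append fact_line if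
-- it is non-empty and not already in grouped[subj]
def pvStepA (grouped : PySem.Dict String (List String)) (p : List (String × String)) :
    PySem.Dict String (List String) :=
  let subj := pvGet p "subject" "Unknown"
  let pred := pvGet p "predicate" ""
  let obj := pvGet p "object" ""
  let grouped1 := if grouped.contains subj then grouped else grouped.insert subj []
  let factLine := PySem.Str.strip (pred ++ ": " ++ obj)
  if factLine ≠ "" ∧ factLine ∉ grouped1.getD subj [] then
    grouped1.modify subj [] (fun facts => facts ++ [factLine])
  else grouped1

def group_by_subject (passages : List (List (String × String))) : List (String × List String) :=
  (passages.foldl pvStepA PySem.Dict.empty).items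

-- ===== PORT B =====
-- B's helpers: subj(p) and fact(p)
def pvSubj (p : List (String × String)) : String := pvGet p "subject" "Unknown"
def pvFact (p : List (String × String)) : String :=
  PySem.Str.strip (pvGet p "predicate" "" ++ ": " ++ pvGet p "object" "")

-- the generator 'f for f in (fact(p) for p in passages if subj(p) == s) if f'
def pvFactsFor (passages : List (List (String × String))) (s : String) : List String :=
  ((passages.filter (fun p => pvSubj p == s)).map pvFact).filter (fun f => f ≠ "")

def group_by_subject_alt (passages : List (List (String × String))) : List (String × List String) :=
  (PySem.Set.ofList (passages.map pvSubj)).map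
    (fun s => (s, PySem.List.dedup (pvFactsFor passages s)))

-- ===== PRECONDITION & SPEC =====
def Spec_group_by_subject (passages : List (List (String × String))) (out : List (String × List String)) : Prop := out = group_by_subject_alt passages
instance (passages : List (List (String × String))) (out : List (String × List String)) : Decidable (Spec_group_by_subject passages out) := by unfold Spec_group_by_subject; infer_instance

-- ===== CLAIM (what is proved, stated in full; the proofs are below) =====
def Claim_equal_group_by_subject : Prop := ∀ (passages : List (List (String × String))), Dom_group_by_subject passages → Spec_group_by_subject passages (group_by_subject passages)

-- ===== LEMMAS AND PROOFS =====

-- abbreviation used only by the proofs: B's per-subject item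
def pvItem (l : List (List (String × String))) (s : String) : String × List String :=
  (s, PySem.List.dedup (pvFactsFor l s))

-- d.modify k d0 f is an insert at the items level
theorem pvModify_eq_insert (d : PySem.Dict String (List String)) (k : String)
    (d0 : List String) (f : List String → List String) :
    d.modify k d0 f = d.insert k (f (d.getD k d0)) :=
  PySem.Dict.ext_iff.mpr rfl

theorem pvGet?_mk_map (S : List String) (v : String → List String) (k : String) :
    (PySem.Dict.mk (S.map (fun s => (s, v s)))).get? k = if k ∈ S then some (v k) else none := by
  induction S with
  | nil => rfl
  | cons a tl ih =>
    simp only [List.map_cons, PySem.Dict.get?_mk_cons, ih]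
    by_cases h : a = k
    · subst h; simp
    · simp [h, Ne.symm h]

theorem pvContains_mk_map (S : List String) (v : String → List String) (k : String) :
    (PySem.Dict.mk (S.map (fun s => (s, v s)))).contains k = decide (k ∈ S) := by
  rw [PySem.Dict.contains_eq_isSome_get?, pvGet?_mk_map]
  by_cases h : k ∈ S <;> simp [h]

theorem pvGetD_mk_map (S : List String) (v : String → List String) (k : String) (h : k ∈ S) :
    (PySem.Dict.mk (S.map (fun s => (s, v s)))).getD k [] = v k := by
  rw [PySem.Dict.getD_eq_get?_getD, pvGet?_mk_map]; simp [h]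

theorem pvContains_mk_item (l : List (List (String × String))) (S : List String) (k : String) :
    (PySem.Dict.mk (S.map (pvItem l))).contains k = decide (k ∈ S) :=
  pvContains_mk_map S (fun s => PySem.List.dedup (pvFactsFor l s)) k

theorem pvFactsFor_append (l : List (List (String × String))) (p : List (String × String))
    (s : String) :
    pvFactsFor (l ++ [p]) s =
      pvFactsFor l s ++
        (if pvSubj p = s then (if pvFact p = "" then [] else [pvFact p]) else []) := by
  by_cases h : pvSubj p = s <;> by_cases h2 : pvFact p = "" <;>
    simp [pvFactsFor, List.filter_append, h, h2]

theorem pvFactsFor_of_not_mem (l : List (List (String × String))) (s : String)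
    (h : s ∉ l.map pvSubj) : pvFactsFor l s = [] := by
  have hf : l.filter (fun p => pvSubj p == s) = [] := by
    refine List.filter_eq_nil_iff.mpr (fun p hp => ?_)
    simp only [beq_iff_eq]
    intro he
    exact h (he ▸ List.mem_map_of_mem hp)
  simp [pvFactsFor, hf]

-- the new passage only touches its own subject's item
theorem pvItem_append_of_ne (l : List (List (String × String))) (p : List (String × String))
    (s : String) (h : pvSubj p ≠ s) : pvItem (l ++ [p]) s = pvItem l s := by
  simp [pvItem, pvFactsFor_append, h]

-- the second half of A's loop body (the fact_line test and append) on a dict in B's shape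
theorem pvTail (l : List (List (String × String))) (p : List (String × String))
    (S' : List String) (h : pvSubj p ∈ S') :
    (if pvFact p ≠ "" ∧ pvFact p ∉ (PySem.Dict.mk (S'.map (pvItem l))).getD (pvSubj p) [] then
       (PySem.Dict.mk (S'.map (pvItem l))).modify (pvSubj p) [] (fun facts => facts ++ [pvFact p])
     else PySem.Dict.mk (S'.map (pvItem l)))
    = PySem.Dict.mk (S'.map (pvItem (l ++ [p]))) := by
  have hgd : (PySem.Dict.mk (S'.map (pvItem l))).getD (pvSubj p) [] =
      PySem.List.dedup (pvFactsFor l (pvSubj p)) := pvGetD_mk_map S' _ _ h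
  rw [hgd]
  by_cases hfl : pvFact p = ""
  · rw [if_neg (by simp [hfl])]
    apply PySem.Dict.ext
    apply List.map_congr_left
    intro s _
    by_cases hs : pvSubj p = s
    · simp [pvItem, pvFactsFor_append, hs, hfl]
    · exact (pvItem_append_of_ne l p s hs).symm
  · by_cases hin : pvFact p ∈ pvFactsFor l (pvSubj p)
    · rw [if_neg (by
        rintro ⟨-, hnotin⟩
        exact hnotin ((PySem.List.mem_dedup _ _).mpr hin))]
      apply PySem.Dict.ext
      apply List.map_congr_left
      intro s _
      by_cases hs : pvSubj p = s
      · subst hs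
        simp [pvItem, pvFactsFor_append, hfl, PySem.Set.ofList_append_singleton,
          PySem.Set.add, PySem.Set.contains, PySem.Set.mem_ofList, hin]
      · exact (pvItem_append_of_ne l p s hs).symm
    · rw [if_pos ⟨hfl, fun hmem => hin ((PySem.List.mem_dedup _ _).mp hmem)⟩,
        pvModify_eq_insert, hgd]
      apply PySem.Dict.ext
      rw [PySem.Dict.items_insert_of_contains _ _ (by
        rw [pvContains_mk_item]; simp [h])]
      show (S'.map (pvItem l)).map _ = S'.map (pvItem (l ++ [p]))
      rw [List.map_map]
      apply List.map_congr_left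
      intro s _
      by_cases hs : pvSubj p = s
      · subst hs
        simp [Function.comp, pvItem, pvFactsFor_append, hfl, PySem.Set.ofList_append_singleton,
          PySem.Set.add, PySem.Set.contains, PySem.Set.mem_ofList, hin]
      · have : (pvItem l s).1 ≠ pvSubj p := Ne.symm hs
        simp only [Function.comp_apply, pvItem] at this ⊢
        simp only [beq_iff_eq]
        rw [if_neg this]
        exact (pvItem_append_of_ne l p s hs).symm

-- one step of A's loop preserves B's closed form
theorem pvStep_mk (l : List (List (String × String))) (p : List (String × String)) :
    pvStepA (PySem.Dict.mk ((PySem.Set.ofList (l.map pvSubj)).map (pvItem l))) p =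
      PySem.Dict.mk ((PySem.Set.ofList ((l ++ [p]).map pvSubj)).map (pvItem (l ++ [p]))) := by
  have hsubj : pvGet p "subject" "Unknown" = pvSubj p := rfl
  have hfact : PySem.Str.strip
      (pvGet p "predicate" "" ++ ": " ++ pvGet p "object" "") = pvFact p := rfl
  have hS' : PySem.Set.ofList ((l ++ [p]).map pvSubj)
      = PySem.Set.add (PySem.Set.ofList (l.map pvSubj)) (pvSubj p) := by
    rw [List.map_append]
    simp [PySem.Set.ofList_append_singleton]
  unfold pvStepA
  dsimp only
  rw [hsubj, hfact, hS']
  by_cases hmem : pvSubj p ∈ l.map pvSubj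
  · have hadd : PySem.Set.add (PySem.Set.ofList (l.map pvSubj)) (pvSubj p)
        = PySem.Set.ofList (l.map pvSubj) := by
      simp [PySem.Set.add, PySem.Set.contains, PySem.Set.mem_ofList, hmem]
    have hc : (PySem.Dict.mk ((PySem.Set.ofList (l.map pvSubj)).map (pvItem l))).contains
        (pvSubj p) = true := by
      rw [pvContains_mk_item]; simp [PySem.Set.mem_ofList, hmem]
    rw [hadd, hc]
    simp only [if_true]
    exact pvTail l p _ (by simp [PySem.Set.mem_ofList, hmem])
  · have hc : (PySem.Dict.mk ((PySem.Set.ofList (l.map pvSubj)).map (pvItem l))).contains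
        (pvSubj p) = false := by
      rw [pvContains_mk_item]; simp [PySem.Set.mem_ofList, hmem]
    have hadd : PySem.Set.add (PySem.Set.ofList (l.map pvSubj)) (pvSubj p)
        = PySem.Set.ofList (l.map pvSubj) ++ [pvSubj p] := by
      simp [PySem.Set.add, PySem.Set.contains, PySem.Set.mem_ofList, hmem]
    have hins : (PySem.Dict.mk ((PySem.Set.ofList (l.map pvSubj)).map (pvItem l))).insert
        (pvSubj p) []
        = PySem.Dict.mk (((PySem.Set.ofList (l.map pvSubj)) ++ [pvSubj p]).map (pvItem l)) := by
      apply PySem.Dict.ext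
      rw [PySem.Dict.items_insert_of_not_contains _ _ hc]
      show (PySem.Set.ofList (l.map pvSubj)).map (pvItem l) ++ _ = _
      rw [List.map_append]
      simp [pvItem, pvFactsFor_of_not_mem l (pvSubj p) hmem]
    rw [hadd, hc]
    simp only [Bool.false_eq_true, if_false]
    rw [hins]
    exact pvTail l p _ (by simp)

theorem pvFold_eq (l : List (List (String × String))) :
    l.foldl pvStepA PySem.Dict.empty =
      PySem.Dict.mk ((PySem.Set.ofList (l.map pvSubj)).map (pvItem l)) := by
  induction l using List.reverseRecOn with
  | nil => rfl
  | append_singleton l p ih =>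
    rw [List.foldl_append, List.foldl_cons, List.foldl_nil, ih, pvStep_mk]

-- ===== VERDICT (by name: the statement is the Claim_ definition above) =====
theorem group_by_subject_spec : Claim_equal_group_by_subject := by
  intro passages _
  unfold Spec_group_by_subject group_by_subject group_by_subject_alt
  rw [pvFold_eq]
  rfl
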